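-- pv_equiv track=rewrite | github.com/slado122/carcosa | carcosa.py | combinator
-- ===== SOURCE A (Python) =====
-- import itertools
--
-- def combinator(wordlist, nWords):
--     combinations = list()
--
--     for n in range(2, nWords+1):
--         combinations.extend(
--             list(map(
--                 lambda combination: ''.join(combination),
--                 itertools.permutations(wordlist, n)
--             ))
--         )
--
--     return list(set(combinations))
-- ===== SOURCE B (Python) =====
-- def combinator(wordlist, nWords):
--     # Level-wise frontier extension: each frontier entry is (joined_prefix, remaining_words).
--     # Each length-n batch is built by extending the length-(n-1) frontier instead of a fresh
--     # itertools.permutations call per n, and we stop as soon as the frontier is exhausted.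
--     frontier = [(w, wordlist[:i] + wordlist[i + 1:]) for i, w in enumerate(wordlist)]
--     combinations = []
--     for _ in range(2, nWords + 1):
--         if not frontier:
--             break
--         frontier = [(s + w, rest[:i] + rest[i + 1:])
--                     for s, rest in frontier
--                     for i, w in enumerate(rest)]
--         combinations.extend(s for s, rest in frontier)
--     return list(set(combinations))
-- ===== Notes on version B (the rewrite author's own statement) =====
-- stated objective: alternative
-- what changed: Replaces the per-length itertools.permutations calls with one iterative level-wise frontier extension (each entry keeps its joined prefix and its remaining word pool), so each length-n batch is built by extending the length-(n-1) frontier rather than regenerated from scratch, and the loop breaks as soon as the frontier is exhausted instead of iterating the full range(2, nWords+1).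
import Mathlib
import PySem

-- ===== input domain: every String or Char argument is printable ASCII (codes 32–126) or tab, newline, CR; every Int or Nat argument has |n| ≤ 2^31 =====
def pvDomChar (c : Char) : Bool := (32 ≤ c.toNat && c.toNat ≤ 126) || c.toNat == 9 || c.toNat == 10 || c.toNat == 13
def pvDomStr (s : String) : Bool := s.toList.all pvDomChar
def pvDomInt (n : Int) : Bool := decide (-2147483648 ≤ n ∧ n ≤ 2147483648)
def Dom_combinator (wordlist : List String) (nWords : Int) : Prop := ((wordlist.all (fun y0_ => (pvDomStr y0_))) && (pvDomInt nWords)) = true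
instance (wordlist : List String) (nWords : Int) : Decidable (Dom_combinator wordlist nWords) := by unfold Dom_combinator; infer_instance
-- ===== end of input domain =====

-- B replaces the per-length itertools.permutations calls with one iterative frontier
-- extension (joined prefix + remaining pool) that stops when the frontier empties (objective: alternative).
-- Python A returns list(set(...)) whose ORDER is hash-dependent; per the task's convention the
-- result is compared as a finite set, and the port models list(set(xs)) as PySem.Set.ofList xs.

-- ===== PORT A =====
def combinator (wordlist : List String) (nWords : Int) : List String :=
  let combinations : List String :=
    (PySem.List.pyRange 2 (nWords + 1) 1).foldl
      (fun acc n =>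
        acc ++ ((PySem.List.permutations wordlist n.toNat).map (fun c => PySem.Str.join "" c)))
      []
  PySem.Set.ofList combinations

-- ===== PORT B =====
-- the inner comprehension: extend each (prefix, remaining-pool) entry by every word of its pool
def combinator_altStep (frontier : List (String × List String)) : List (String × List String) :=
  frontier.flatMap (fun sr =>
    (PySem.List.enumerate sr.2).map (fun iw =>
      (sr.1 ++ iw.2,
       PySem.List.slice sr.2 none (some iw.1) ++ PySem.List.slice sr.2 (some (iw.1 + 1)) none)))

-- the for-loop over range(2, nWords+1) with its break, extending the combinations accumulator
def combinator_altLoop : Nat → List (String × List String) → List String → List String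
  | 0, _, combinations => combinations
  | k + 1, frontier, combinations =>
    if frontier.isEmpty then combinations
    else
      let frontier' := combinator_altStep frontier
      combinator_altLoop k frontier' (combinations ++ frontier'.map Prod.fst)

def combinator_alt (wordlist : List String) (nWords : Int) : List String :=
  let frontier0 := (PySem.List.enumerate wordlist).map (fun iw =>
    (iw.2, PySem.List.slice wordlist none (some iw.1) ++ PySem.List.slice wordlist (some (iw.1 + 1)) none))
  PySem.Set.ofList (combinator_altLoop (nWords + 1 - 2).toNat frontier0 [])

-- ===== PRECONDITION & SPEC =====
def Spec_combinator (wordlist : List String) (nWords : Int) (out : List String) : Prop := out = combinator_alt wordlist nWords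
instance (wordlist : List String) (nWords : Int) (out : List String) : Decidable (Spec_combinator wordlist nWords out) := by unfold Spec_combinator; infer_instance

-- ===== CLAIM (what is proved, stated in full; the proofs are below) =====
def Claim_equal_combinator : Prop := ∀ (wordlist : List String) (nWords : Int), Dom_combinator wordlist nWords → Spec_combinator wordlist nWords (combinator wordlist nWords)

-- ===== LEMMAS AND PROOFS =====

-- joining with the empty separator peels off the head word
theorem pvJoin_empty_cons (x : String) (l : List String) :
    PySem.Str.join "" (x :: l) = x ++ PySem.Str.join "" l := by
  have h : PySem.Chars.join [] (x.toList :: l.map String.toList)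
      = x.toList ++ PySem.Chars.join [] (l.map String.toList) := by
    cases l <;> simp [PySem.Chars.join_cons_cons, PySem.Chars.join_singleton, PySem.Chars.join_nil]
  simp [PySem.Str.join, h, String.ofList_append]

-- one unfolding of the library permutations
theorem pvPermutations_succ {α : Type} (xs : List α) (r : Nat) :
    PySem.List.permutations xs (r + 1)
      = (List.range xs.length).flatMap (fun i =>
          match xs[i]? with
          | none => []
          | some x => (PySem.List.permutations (xs.eraseIdx i) r).map (x :: ·)) := rfl

-- the step on a singleton frontier, in take/drop form
theorem pvStep_singleton (s : String) (rest : List String) :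
    combinator_altStep [(s, rest)]
      = (List.range rest.length).map (fun k => (s ++ rest.getD k "", rest.eraseIdx k)) := by
  simp [combinator_altStep, PySem.List.enumerate_eq_map_pyRange (d := ""), PySem.List.pyRange_one,
        List.map_map]
  intro k hk
  have h2 : PySem.List.slice rest (some ((k:Int) + 1)) none = rest.drop (k+1) := by
    have := PySem.List.slice_from_natCast (xs := rest) (a := k+1)
    push_cast at this ⊢
    exact this
  rw [h2]
  exact (List.eraseIdx_eq_take_drop_succ rest k).symm

theorem pvStep_iter_append (n : Nat) (F G : List (String × List String)) :
    combinator_altStep^[n] (F ++ G) = combinator_altStep^[n] F ++ combinator_altStep^[n] G := by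
  induction n generalizing F G with
  | zero => simp
  | succ n ih =>
    rw [Function.iterate_succ_apply, Function.iterate_succ_apply, Function.iterate_succ_apply]
    rw [show combinator_altStep (F ++ G) = combinator_altStep F ++ combinator_altStep G by
      simp [combinator_altStep]]
    exact ih _ _

theorem pvStep_iter_flat (n : Nat) (F : List (String × List String)) :
    combinator_altStep^[n] F = F.flatMap (fun x => combinator_altStep^[n] [x]) := by
  induction F with
  | nil => simp [show combinator_altStep^[n] [] = [] by
      induction n with
      | zero => rfl
      | succ n ih => rw [Function.iterate_succ_apply]; simpa [combinator_altStep] using ih]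
  | cons x F ih =>
    rw [show (x :: F) = [x] ++ F from rfl, pvStep_iter_append]
    simp [ih]

-- the frontier after n extensions of a singleton carries exactly the joined r-permutations
theorem pvFrontier_perm (n : Nat) (s : String) (rest : List String) :
    (combinator_altStep^[n] [(s, rest)]).map Prod.fst
      = (PySem.List.permutations rest n).map (fun p => s ++ PySem.Str.join "" p) := by
  induction n generalizing s rest with
  | zero =>
    show [s] = _
    simp [show PySem.List.permutations rest 0 = [[]] from rfl, PySem.Str.join]
  | succ n ih =>
    rw [Function.iterate_succ_apply, pvStep_singleton, pvStep_iter_flat, pvPermutations_succ]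
    simp only [List.flatMap_map, List.map_flatMap]
    apply List.flatMap_congr
    intro k hk
    rw [List.mem_range] at hk
    rw [ih]
    rw [List.getElem?_eq_getElem hk, List.getD_eq_getElem?_getD, List.getElem?_eq_getElem hk]
    simp only [Option.getD_some, List.map_map]
    apply List.map_congr_left
    intro p hp
    simp [Function.comp, pvJoin_empty_cons, String.append_assoc]

-- the concatenation of the frontier strings of levels t+1 .. t+k
def pvCat : List (String × List String) → Nat → List String
  | _, 0 => []
  | F, k + 1 =>
      (combinator_altStep F).map Prod.fst ++ pvCat (combinator_altStep F) k

theorem pvCat_nil (k : Nat) : pvCat [] k = [] := by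
  induction k with
  | zero => rfl
  | succ k ih =>
    show (combinator_altStep []).map Prod.fst ++ pvCat (combinator_altStep []) k = []
    simp only [show combinator_altStep [] = [] from rfl, List.map_nil, List.nil_append, ih]

theorem pvLoop_eq (k : Nat) (F : List (String × List String)) (acc : List String) :
    combinator_altLoop k F acc = acc ++ pvCat F k := by
  induction k generalizing F acc with
  | zero => simp [combinator_altLoop, pvCat]
  | succ k ih =>
    by_cases hF : F.isEmpty
    · rw [List.isEmpty_iff] at hF
      subst hF
      simp [combinator_altLoop, pvCat_nil]
    · rw [show combinator_altLoop (k+1) F acc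
          = combinator_altLoop k (combinator_altStep F) (acc ++ (combinator_altStep F).map Prod.fst)
          by simp [combinator_altLoop, hF]]
      rw [ih]
      show _ = acc ++ ((combinator_altStep F).map Prod.fst ++ pvCat (combinator_altStep F) k)
      rw [List.append_assoc]

-- A's per-length blocks, from length a up
def pvAcat (wordlist : List String) : Nat → Nat → List String
  | _, 0 => []
  | a, k + 1 =>
      (PySem.List.permutations wordlist a).map (fun c => PySem.Str.join "" c)
        ++ pvAcat wordlist (a + 1) k

theorem pvA_fold (wordlist : List String) (a k : Nat) (acc : List String) :
    (PySem.List.pyRange (a : Int) ((a : Int) + (k : Int)) 1).foldl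
        (fun acc n => acc ++ ((PySem.List.permutations wordlist n.toNat).map (fun c => PySem.Str.join "" c))) acc
      = acc ++ pvAcat wordlist a k := by
  induction k generalizing a acc with
  | zero =>
    rw [PySem.List.pyRange_one_eq_nil (by push_cast; omega)]
    simp [pvAcat]
  | succ k ih =>
    rw [PySem.List.pyRange_one_cons (by push_cast; omega)]
    simp only [List.foldl_cons]
    have hcast : ((a : Int) + 1) = ((a + 1 : Nat) : Int) := by push_cast; ring
    have hcast2 : ((a : Int) + ((k + 1 : Nat) : Int)) = ((a + 1 : Nat) : Int) + (k : Int) := by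
      push_cast; ring
    rw [hcast2, hcast, ih]
    show acc ++ (PySem.List.permutations wordlist (a : Int).toNat).map (fun c => PySem.Str.join "" c)
          ++ pvAcat wordlist (a + 1) k = _
    rw [List.append_assoc]
    simp [pvAcat]

theorem pvCat_eq_pvAcat (wordlist : List String) (k t : Nat) :
    pvCat (combinator_altStep^[t] [("", wordlist)]) k = pvAcat wordlist (t + 1) k := by
  induction k generalizing t with
  | zero => rfl
  | succ k ih =>
    show (combinator_altStep (combinator_altStep^[t] [("", wordlist)])).map Prod.fst
        ++ pvCat (combinator_altStep (combinator_altStep^[t] [("", wordlist)])) k = _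
    rw [← Function.iterate_succ_apply' combinator_altStep t]
    rw [pvFrontier_perm]
    rw [ih (t + 1)]
    show (PySem.List.permutations wordlist (t+1)).map (fun p => "" ++ PySem.Str.join "" p)
        ++ pvAcat wordlist (t + 2) k
      = (PySem.List.permutations wordlist (t+1)).map (fun c => PySem.Str.join "" c)
        ++ pvAcat wordlist (t + 1 + 1) k
    simp [String.empty_append]

-- ===== VERDICT (by name: the statement is the Claim_ definition above) =====
theorem combinator_spec : Claim_equal_combinator := by
  unfold Claim_equal_combinator Spec_combinator
  intro wordlist nWords _
  have hm : combinator wordlist nWords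
      = PySem.Set.ofList (pvAcat wordlist 2 (nWords + 1 - 2).toNat) := by
    show PySem.Set.ofList _ = _
    congr 1
    have hrange : PySem.List.pyRange 2 (nWords + 1) 1
        = PySem.List.pyRange ((2 : Nat) : Int) (((2 : Nat) : Int) + (((nWords + 1 - 2).toNat : Nat) : Int)) 1 := by
      by_cases h : 1 ≤ nWords
      · congr 1
        push_cast
        omega
      · rw [PySem.List.pyRange_one_eq_nil (by omega),
            PySem.List.pyRange_one_eq_nil (by push_cast; omega)]
    rw [hrange, pvA_fold]
    simp
  have hF0 : combinator_alt wordlist nWords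
      = PySem.Set.ofList (combinator_altLoop (nWords + 1 - 2).toNat
          (combinator_altStep [("", wordlist)]) []) := by
    show PySem.Set.ofList _ = _
    congr 2
    simp [combinator_altStep, String.empty_append]
  rw [hm, hF0]
  rw [pvLoop_eq]
  rw [show combinator_altStep [("", wordlist)] = combinator_altStep^[1] [("", wordlist)] from
    (Function.iterate_one combinator_altStep ▸ rfl)]
  rw [pvCat_eq_pvAcat]
  rfl
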